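-- pv_equiv track=rewrite | github.com/dachidahu/SC2AgentsZoo2 | agent_TLeagueFormal14/DistLadder3/distladder3/frontend_tool/ovr_winrate_viewer.py | _pick_latest_timestamps
-- ===== SOURCE A (Python) =====
-- def _pick_latest_timestamps(model_keys, timestamps):
--   new_m, new_t = [], []
--   for m, t in zip(model_keys, timestamps):
--     if len(new_m) == 0:
--       new_m.append(m)
--       new_t.append(t)
--       continue
--     if new_m[-1] != m:
--       new_m.append(m)
--       new_t.append(t)
--       continue
--     if t > new_t[-1]: # always keep the newer timestamp
--       new_t[-1] = t
--   return new_m, new_t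
-- ===== SOURCE B (Python) =====
-- def _pick_latest_timestamps(model_keys, timestamps):
--   pairs = list(zip(model_keys, timestamps))
--   n = len(pairs)
--   new_m, new_t = [], []
--   i = 0
--   while i < n:
--     m, best = pairs[i]
--     i += 1
--     while i < n and pairs[i][0] == m:
--       if pairs[i][1] > best:
--         best = pairs[i][1]
--       i += 1
--     new_m.append(m)
--     new_t.append(best)
--   return new_m, new_t
-- ===== Notes on version B (the rewrite author's own statement) =====
-- stated objective: alternative
-- what changed: Replaces the element-by-element loop that peeks at and mutates the last appended entries with an outer loop over runs: each maximal run of equal consecutive keys is scanned once, its key and maximum timestamp appended, and the list advanced past the run.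
import Mathlib
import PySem

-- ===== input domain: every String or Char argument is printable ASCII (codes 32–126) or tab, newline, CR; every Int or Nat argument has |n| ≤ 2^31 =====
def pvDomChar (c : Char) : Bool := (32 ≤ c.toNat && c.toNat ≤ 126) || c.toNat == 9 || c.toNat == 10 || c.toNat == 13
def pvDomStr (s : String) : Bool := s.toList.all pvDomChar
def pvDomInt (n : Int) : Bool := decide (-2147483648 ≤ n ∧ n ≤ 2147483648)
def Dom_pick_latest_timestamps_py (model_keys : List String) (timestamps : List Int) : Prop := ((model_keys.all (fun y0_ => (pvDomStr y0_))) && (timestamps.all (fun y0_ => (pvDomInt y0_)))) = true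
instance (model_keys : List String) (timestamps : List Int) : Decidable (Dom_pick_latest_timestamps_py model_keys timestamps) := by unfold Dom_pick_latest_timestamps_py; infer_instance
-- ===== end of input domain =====

-- B replaces A's last-element-peeking accumulator with an outer loop over maximal runs
-- of equal consecutive keys (scan run, take its max timestamp, advance past it); alternative, same cost.

-- ===== PORT A =====
-- loop body of A; accumulators are kept REVERSED (Python appends at the end / peeks new_m[-1];
-- here we cons at the front / peek the head), and reversed once at the end.
def pvStepA (acc : List String × List Int) (p : String × Int) : List String × List Int :=
  match acc with
  | ([], ts) => ([p.1], p.2 :: ts)                 -- len(new_m)==0: append both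
  | (m0 :: ms, ts) =>
    if m0 ≠ p.1 then (p.1 :: m0 :: ms, p.2 :: ts)  -- new_m[-1] != m: append both
    else
      match ts with
      | t0 :: ts' => if p.2 > t0 then (m0 :: ms, p.2 :: ts') else (m0 :: ms, t0 :: ts')
      | [] => (m0 :: ms, [])                       -- unreachable: new_t has the same length as new_m

def pick_latest_timestamps_py (model_keys : List String) (timestamps : List Int) : List String × List Int :=
  let r := (model_keys.zip timestamps).foldl pvStepA ([], [])
  (r.1.reverse, r.2.reverse)

-- ===== PORT B =====
-- outer loop over runs: head gives the key, the inner scan (takeWhile + fold = the inner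
-- while over pairs[1..]) gives the run's max timestamp, recursion on the remainder (pairs = pairs[i:]).
def pvAltGo (pairs : List (String × Int)) : List String × List Int :=
  match pairs with
  | [] => ([], [])
  | (m, t) :: rest =>
    let run := rest.takeWhile (fun p => p.1 == m)
    let best := run.foldl (fun b p => if p.2 > b then p.2 else b) t
    let r := pvAltGo (rest.dropWhile (fun p => p.1 == m))
    (m :: r.1, best :: r.2)
termination_by pairs.length
decreasing_by
  have := List.length_dropWhile_le (fun p : String × Int => p.1 == m) rest
  simp; omega

def pick_latest_timestamps_py_alt (model_keys : List String) (timestamps : List Int) : List String × List Int :=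
  pvAltGo (model_keys.zip timestamps)

-- ===== PRECONDITION & SPEC =====
def Spec_pick_latest_timestamps_py (model_keys : List String) (timestamps : List Int) (out : List String × List Int) : Prop := out = pick_latest_timestamps_py_alt model_keys timestamps
instance (model_keys : List String) (timestamps : List Int) (out : List String × List Int) : Decidable (Spec_pick_latest_timestamps_py model_keys timestamps out) := by unfold Spec_pick_latest_timestamps_py; infer_instance

-- ===== CLAIM (what is proved, stated in full; the proofs are below) =====
def Claim_equal_pick_latest_timestamps_py : Prop := ∀ (model_keys : List String) (timestamps : List Int), Dom_pick_latest_timestamps_py model_keys timestamps → Spec_pick_latest_timestamps_py model_keys timestamps (pick_latest_timestamps_py model_keys timestamps)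

-- ===== LEMMAS AND PROOFS =====

-- folding A's step over a run of pairs whose keys all equal the current head only
-- updates the head timestamp to the run's maximum
theorem pvStepA_run (run : List (String × Int)) (m : String) (ms : List String)
    (t : Int) (ts : List Int) (h : ∀ p ∈ run, p.1 = m) :
    run.foldl pvStepA (m :: ms, t :: ts)
      = (m :: ms, (run.foldl (fun b p => if p.2 > b then p.2 else b) t) :: ts) := by
  induction run generalizing t with
  | nil => rfl
  | cons p rest ih =>
    have hp : p.1 = m := h p (List.mem_cons_self)
    have hrest : ∀ q ∈ rest, q.1 = m := fun q hq => h q (List.mem_cons_of_mem _ hq)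
    simp only [List.foldl_cons, pvStepA, hp, ne_eq, not_true_eq_false, if_false]
    by_cases hgt : p.2 > t
    · simp only [if_pos hgt, ih _ hrest]
    · simp only [if_neg hgt, ih _ hrest]

-- main bridge: A's fold from an open accumulator equals B's run recursion on the
-- remaining pairs, with the open entry as the head of the first run
theorem pvFold_eq_go (l : List (String × Int)) (m : String) (t : Int)
    (ms : List String) (ts : List Int) :
    l.foldl pvStepA (m :: ms, t :: ts)
      = ((pvAltGo ((m, t) :: l)).1.reverse ++ ms, (pvAltGo ((m, t) :: l)).2.reverse ++ ts) := by
  induction hn : l.length using Nat.strong_induction_on generalizing l m t ms ts with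
  | _ n ih =>
  subst hn
  have hsplit : l = l.takeWhile (fun p => p.1 == m) ++ l.dropWhile (fun p => p.1 == m) :=
    (List.takeWhile_append_dropWhile).symm
  have hrun : ∀ p ∈ l.takeWhile (fun p => p.1 == m), p.1 = m := by
    intro p hp
    have := List.mem_takeWhile_imp hp
    simpa using this
  rw [pvAltGo]
  conv_lhs => rw [hsplit]
  rw [List.foldl_append, pvStepA_run _ _ _ _ _ hrun]
  set best := (l.takeWhile (fun p => p.1 == m)).foldl (fun b p => if p.2 > b then p.2 else b) t with hbest
  cases hdw : l.dropWhile (fun p => p.1 == m) with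
  | nil => simp [pvAltGo]
  | cons q r =>
    have hq : ¬ (q.1 == m) = true := by
      have := List.head?_dropWhile_not (fun p : String × Int => p.1 == m) l
      rw [hdw] at this; simpa using this
    have hqm : m ≠ q.1 := by
      intro h; exact hq (by simp [h])
    have hlen : r.length < l.length := by
      have h1 : (l.dropWhile (fun p => p.1 == m)).length ≤ l.length :=
        List.length_dropWhile_le _ _
      rw [hdw] at h1; simp at h1; omega
    simp only [List.foldl_cons]
    have hstep : pvStepA (m :: ms, best :: ts) q = (q.1 :: m :: ms, q.2 :: best :: ts) := by
      simp only [pvStepA, ne_eq]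
      rw [if_pos hqm]
    rw [hstep, ih r.length hlen r q.1 q.2 (m :: ms) (best :: ts) rfl]
    simp

-- ===== VERDICT (by name: the statement is the Claim_ definition above) =====
theorem pick_latest_timestamps_py_spec : Claim_equal_pick_latest_timestamps_py := by
  intro model_keys timestamps _
  unfold Spec_pick_latest_timestamps_py pick_latest_timestamps_py pick_latest_timestamps_py_alt
  cases hz : model_keys.zip timestamps with
  | nil => simp [pvAltGo]
  | cons p l =>
    have h0 : pvStepA ([], []) p = ([p.1], [p.2]) := rfl
    simp only [List.foldl_cons, h0, pvFold_eq_go]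
    simp
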